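-- pv_equiv track=rewrite | github.com/daniel-reich/ubiquitous-fiesta | Ygt4LGupxDAqXNrhS_18.py | spotlight_map
-- ===== SOURCE A (Python) =====
-- def spotlight_map(grid):
--     d = {}
--     for i in range(len(grid)):
--         for j in range(len(grid[0])):
--             d[(i,j)] = grid[i][j]
--     a = [[-1,-1],[-1,0],[-1,1],[0,-1],[0,0],[0,1],[1,-1],[1,0],[1,1]]
--
--     for loc in d.keys():
--         ctr = 0
--         for k in range(len(a)):
--             if (loc[0]+a[k][0],loc[1]+a[k][1]) in d:
--                 ctr += d[(loc[0]+a[k][0],loc[1]+a[k][1])]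
--         grid[loc[0]][loc[1]] = ctr
--
--     return grid
-- ===== SOURCE B (Python) =====
-- def spotlight_map(grid):
--     if not grid:
--         return grid
--     rows, cols = len(grid), len(grid[0])
--     # 2D prefix-sum table: P[i][j] = sum of grid[x][y] for x<i, y<j (first cols columns)
--     P = [[0] * (cols + 1)]
--     for row in grid:
--         prev = P[-1]
--         new = [0]
--         for j in range(cols):
--             new.append(new[-1] + prev[j + 1] - prev[j] + row[j])
--         P.append(new)
--     for i in range(rows):
--         r1, r2 = i - 1 if i else 0, min(i + 1, rows - 1)
--         for j in range(cols):
--             c1, c2 = j - 1 if j else 0, min(j + 1, cols - 1)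
--             grid[i][j] = P[r2 + 1][c2 + 1] - P[r1][c2 + 1] - P[r2 + 1][c1] + P[r1][c1]
--     return grid
-- ===== Notes on version B (the rewrite author's own statement) =====
-- stated objective: faster
-- what changed: Replaces A's dictionary of all cells plus a per-cell 9-offset membership-and-lookup gather with a 2D prefix-sum table built in one pass and a single clamped rectangle query per cell.
import Mathlib
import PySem

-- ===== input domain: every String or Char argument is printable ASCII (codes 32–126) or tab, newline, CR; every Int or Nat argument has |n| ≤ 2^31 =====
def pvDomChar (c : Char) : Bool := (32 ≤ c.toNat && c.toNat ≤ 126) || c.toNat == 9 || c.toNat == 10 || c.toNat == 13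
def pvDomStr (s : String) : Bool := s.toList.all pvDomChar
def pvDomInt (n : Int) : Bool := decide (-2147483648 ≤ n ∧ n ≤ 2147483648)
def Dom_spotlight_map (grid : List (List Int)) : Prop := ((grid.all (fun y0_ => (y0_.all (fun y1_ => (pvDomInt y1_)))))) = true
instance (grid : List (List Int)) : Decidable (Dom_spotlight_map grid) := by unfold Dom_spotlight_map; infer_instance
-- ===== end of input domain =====

-- B replaces A's per-cell 9-point dictionary gather by a 2D prefix-sum table with one
-- rectangle query per cell (objective: faster, in a timing run). Both Pythons mutate
-- `grid` in place and return it; the equivalence proved here is about the return value.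

-- ===== PORT A =====
-- grid[i][j] reads are ported as getD with default 0; Pre_ guarantees they are in range.
-- `if key in d: ctr += d[key]` is ported as contains + getD (the lookup is guarded, so exact).
def spotlight_map (grid : List (List Int)) : List (List Int) :=
  let d : PySem.Dict (Int × Int) Int :=
    (List.range grid.length).foldl (fun d (i : Nat) =>
      (List.range (grid.headD []).length).foldl (fun d (j : Nat) =>
        d.insert ((i : Int), (j : Int)) ((grid.getD i []).getD j 0)) d) PySem.Dict.empty
  let a : List (Int × Int) := [(-1,-1),(-1,0),(-1,1),(0,-1),(0,0),(0,1),(1,-1),(1,0),(1,1)]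
  d.keys.foldl (fun g loc =>
    let ctr : Int := a.foldl (fun ctr off =>
      if d.contains (loc.1 + off.1, loc.2 + off.2) then
        ctr + d.getD (loc.1 + off.1, loc.2 + off.2) 0
      else ctr) 0
    g.set loc.1.toNat ((g.getD loc.1.toNat []).set loc.2.toNat ctr)) grid

-- ===== PORT B =====
def spotlight_map_alt (grid : List (List Int)) : List (List Int) :=
  if grid = [] then grid else
  let rows := grid.length
  let cols := (grid.headD []).length
  let P : List (List Int) := grid.foldl (fun P row =>
      let prev := P.getLastD []
      let newRow := (List.range cols).foldl (fun r j =>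
          r ++ [r.getLastD 0 + prev.getD (j+1) 0 - prev.getD j 0 + row.getD j 0]) [0]
      P ++ [newRow]) [List.replicate (cols+1) 0]
  (List.range rows).foldl (fun g i =>
    let r1 := i - 1
    let r2 := min (i+1) (rows-1)
    (List.range cols).foldl (fun g j =>
      let c1 := j - 1
      let c2 := min (j+1) (cols-1)
      let v := (P.getD (r2+1) []).getD (c2+1) 0 - (P.getD r1 []).getD (c2+1) 0
             - (P.getD (r2+1) []).getD c1 0 + (P.getD r1 []).getD c1 0
      g.set i ((g.getD i []).set j v)) g) grid

-- ===== PRECONDITION & SPEC =====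
-- Pre_ excludes exactly the ragged grids on which Python A raises IndexError: a row
-- shorter than row 0 makes A's read grid[i][j] (j < len(grid[0])) raise.
def Pre_spotlight_map (grid : List (List Int)) : Prop :=
  ∀ row ∈ grid, (grid.headD []).length ≤ row.length
instance (grid : List (List Int)) : Decidable (Pre_spotlight_map grid) := by unfold Pre_spotlight_map; infer_instance

def pvWitness_spotlight_map : List (List Int) := [[1, 2, 3], [4, 5, 6], [7, 8, 9]]

def Spec_spotlight_map (grid : List (List Int)) (out : List (List Int)) : Prop := out = spotlight_map_alt grid
instance (grid : List (List Int)) (out : List (List Int)) : Decidable (Spec_spotlight_map grid out) := by unfold Spec_spotlight_map; infer_instance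

-- ===== CLAIM (what is proved, stated in full; the proofs are below) =====
def Claim_equal_spotlight_map : Prop := ∀ (grid : List (List Int)), Dom_spotlight_map grid → Pre_spotlight_map grid → Spec_spotlight_map grid (spotlight_map grid)

-- ===== LEMMAS AND PROOFS =====

-- the row-major list of all cell coordinates (i, j), i < r, j < c
def cells (r c : Nat) : List (Nat × Nat) := (List.range r).flatMap (fun i => (List.range c).map (fun j => (i, j)))

theorem cells_nodup (r c : Nat) : (cells r c).Nodup := by
  rw [cells, List.nodup_flatMap]
  refine ⟨fun i _ => List.nodup_range.map (fun a b h => by simpa using h), ?_⟩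
  refine List.nodup_range.imp ?_
  intro a b hab
  simp only [Function.onFun, List.disjoint_left, List.mem_map]
  rintro p ⟨x, hx, rfl⟩ ⟨y, hy, heq⟩
  exact hab (congrArg Prod.fst heq).symm

theorem mem_cells (r c : Nat) (p : Nat × Nat) : p ∈ cells r c ↔ p.1 < r ∧ p.2 < c := by
  cases p; simp [cells]

-- a nested fold over two ranges is a single fold over the cell list
theorem nested_to_cells {γ : Type} (rows cols : Nat) (f : γ → Nat → Nat → γ) (init : γ) :
    (List.range rows).foldl (fun g i => (List.range cols).foldl (fun g j => f g i j) g) init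
    = (cells rows cols).foldl (fun g p => f g p.1 p.2) init := by
  rw [cells, List.foldl_flatMap]
  simp [List.foldl_map]

def cellKey (p : Nat × Nat) : Int × Int := ((p.1 : Int), (p.2 : Int))

theorem cellKey_inj : Function.Injective cellKey := by
  intro a b h
  cases a; cases b
  simp only [cellKey, Prod.mk.injEq, Nat.cast_inj] at h
  simp [h.1, h.2]

-- the dictionary A builds, as a fold over the cell list
def dGridExpr (grid : List (List Int)) (rows cols : Nat) : PySem.Dict (Int × Int) Int :=
  (cells rows cols).foldl (fun d p => d.insert (cellKey p) ((grid.getD p.1 []).getD p.2 0)) PySem.Dict.empty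

theorem dGrid_items (grid : List (List Int)) (rows cols : Nat) :
    (dGridExpr grid rows cols).items
      = (cells rows cols).map (fun p => (cellKey p, (grid.getD p.1 []).getD p.2 0)) := by
  rw [dGridExpr, PySem.Dict.items_foldl_insert_fresh _ cellKey _ _ (fun a _ => by simp)
    ((cells_nodup rows cols).map cellKey_inj)]
  simp [PySem.Dict.empty]

theorem dGrid_keys (grid : List (List Int)) (rows cols : Nat) :
    (dGridExpr grid rows cols).keys = (cells rows cols).map cellKey := by
  show (dGridExpr grid rows cols).items.map Prod.fst = _
  rw [dGrid_items, List.map_map]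
  rfl

theorem dGrid_keys_nodup (grid : List (List Int)) (rows cols : Nat) :
    (dGridExpr grid rows cols).keys.Nodup := by
  rw [dGrid_keys]
  exact (cells_nodup rows cols).map cellKey_inj

theorem dGrid_get? (grid : List (List Int)) (rows cols : Nat) (x y : Int) :
    (dGridExpr grid rows cols).get? (x, y)
      = if 0 ≤ x ∧ x < rows ∧ 0 ≤ y ∧ y < cols
        then some ((grid.getD x.toNat []).getD y.toNat 0) else none := by
  split
  · next h =>
    apply PySem.Dict.get?_of_mem_items _ _ (dGrid_keys_nodup grid rows cols)
    rw [dGrid_items, List.mem_map]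
    refine ⟨(x.toNat, y.toNat), ?_, ?_⟩
    · rw [mem_cells]
      constructor <;> omega
    · have hx : ((x.toNat : Int)) = x := by omega
      have hy : ((y.toNat : Int)) = y := by omega
      simp [cellKey, hx, hy]
  · next h =>
    rw [PySem.Dict.get?_eq_none_iff_not_mem_keys, dGrid_keys, List.mem_map]
    rintro ⟨p, hp, hk⟩
    rw [mem_cells] at hp
    simp only [cellKey, Prod.mk.injEq] at hk
    omega

theorem dGrid_contains (grid : List (List Int)) (rows cols : Nat) (x y : Int) :
    (dGridExpr grid rows cols).contains (x, y)
      = decide (0 ≤ x ∧ x < rows ∧ 0 ≤ y ∧ y < cols) := by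
  rw [PySem.Dict.contains_eq_isSome_get?, dGrid_get?]
  split <;> simp_all

theorem dGrid_getD (grid : List (List Int)) (rows cols : Nat) (x y : Int)
    (h : 0 ≤ x ∧ x < rows ∧ 0 ≤ y ∧ y < cols) :
    (dGridExpr grid rows cols).getD (x, y) 0 = (grid.getD x.toNat []).getD y.toNat 0 := by
  rw [PySem.Dict.getD_eq_get?_getD, dGrid_get?, if_pos h]
  rfl

-- original cell values and their 2D prefix sums
def origf (grid : List (List Int)) (x y : Nat) : Int := (grid.getD x []).getD y 0

def Fsum (f : Nat → Nat → Int) (r c : Nat) : Int := ∑ x ∈ Finset.range r, ∑ y ∈ Finset.range c, f x y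

theorem tri (n i : Nat) (hi : i < n) (h : Nat → Int) :
    ∑ x ∈ Finset.range (min (i+1) (n-1) + 1), h x - ∑ x ∈ Finset.range (i-1), h x
    = (if 1 ≤ i then h (i-1) else 0) + h i + (if i+1 < n then h (i+1) else 0) := by
  have hstep : i ≥ 1 → ∑ x ∈ Finset.range i, h x = ∑ x ∈ Finset.range (i-1), h x + h (i-1) := by
    intro h1
    conv_lhs => rw [show i = (i-1) + 1 by omega]
    rw [Finset.sum_range_succ]
  by_cases hi0 : 1 ≤ i <;> by_cases hin : i + 1 < n
  · rw [show min (i+1) (n-1) + 1 = i + 2 by omega]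
    simp only [Finset.sum_range_succ, if_pos hi0, if_pos hin, hstep hi0]
    ring
  · rw [show min (i+1) (n-1) + 1 = i + 1 by omega]
    simp only [Finset.sum_range_succ, if_pos hi0, if_neg hin, hstep hi0]
    ring
  · have e0 : i = 0 := by omega
    subst e0
    rw [show min (0+1) (n-1) + 1 = 2 by omega]
    simp [Finset.sum_range_succ, hin]
  · have e0 : i = 0 := by omega
    subst e0
    rw [show min (0+1) (n-1) + 1 = 1 by omega]
    simp [hin]

-- a clamped rectangle query on the prefix sums is the 9-point neighborhood sum
theorem rect_eq (f : Nat → Nat → Int) (rows cols i j : Nat) (hi : i < rows) (hj : j < cols) :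
    Fsum f (min (i+1) (rows-1) + 1) (min (j+1) (cols-1) + 1)
      - Fsum f (i-1) (min (j+1) (cols-1) + 1)
      - Fsum f (min (i+1) (rows-1) + 1) (j-1)
      + Fsum f (i-1) (j-1)
    = (if 1 ≤ i ∧ 1 ≤ j then f (i-1) (j-1) else 0)
      + (if 1 ≤ i then f (i-1) j else 0)
      + (if 1 ≤ i ∧ j+1 < cols then f (i-1) (j+1) else 0)
      + (if 1 ≤ j then f i (j-1) else 0)
      + f i j
      + (if j+1 < cols then f i (j+1) else 0)
      + (if i+1 < rows ∧ 1 ≤ j then f (i+1) (j-1) else 0)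
      + (if i+1 < rows then f (i+1) j else 0)
      + (if i+1 < rows ∧ j+1 < cols then f (i+1) (j+1) else 0) := by
  have colsum : ∀ x : Nat,
      (∑ y ∈ Finset.range (min (j+1) (cols-1) + 1), f x y) - (∑ y ∈ Finset.range (j-1), f x y)
      = (if 1 ≤ j then f x (j-1) else 0) + f x j + (if j+1 < cols then f x (j+1) else 0) :=
    fun x => tri cols j hj (f x)
  have hr : Fsum f (min (i+1) (rows-1) + 1) (min (j+1) (cols-1) + 1) - Fsum f (i-1) (min (j+1) (cols-1) + 1)
      = (if 1 ≤ i then (∑ y ∈ Finset.range (min (j+1) (cols-1) + 1), f (i-1) y) else 0)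
        + (∑ y ∈ Finset.range (min (j+1) (cols-1) + 1), f i y)
        + (if i+1 < rows then (∑ y ∈ Finset.range (min (j+1) (cols-1) + 1), f (i+1) y) else 0) :=
    tri rows i hi _
  have hr2 : Fsum f (min (i+1) (rows-1) + 1) (j-1) - Fsum f (i-1) (j-1)
      = (if 1 ≤ i then (∑ y ∈ Finset.range (j-1), f (i-1) y) else 0)
        + (∑ y ∈ Finset.range (j-1), f i y)
        + (if i+1 < rows then (∑ y ∈ Finset.range (j-1), f (i+1) y) else 0) :=
    tri rows i hi _
  have key : Fsum f (min (i+1) (rows-1) + 1) (min (j+1) (cols-1) + 1)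
      - Fsum f (i-1) (min (j+1) (cols-1) + 1)
      - Fsum f (min (i+1) (rows-1) + 1) (j-1)
      + Fsum f (i-1) (j-1)
      = (if 1 ≤ i then ((if 1 ≤ j then f (i-1) (j-1) else 0) + f (i-1) j + (if j+1 < cols then f (i-1) (j+1) else 0)) else 0)
        + ((if 1 ≤ j then f i (j-1) else 0) + f i j + (if j+1 < cols then f i (j+1) else 0))
        + (if i+1 < rows then ((if 1 ≤ j then f (i+1) (j-1) else 0) + f (i+1) j + (if j+1 < cols then f (i+1) (j+1) else 0)) else 0) := by
    rw [← colsum, ← colsum, ← colsum]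
    by_cases h1 : 1 ≤ i <;> by_cases h2 : i + 1 < rows <;>
      simp only [if_pos, h1, h2, if_false] at hr hr2 ⊢ <;> linarith
  rw [key]
  by_cases h1 : 1 ≤ i <;> by_cases h2 : i + 1 < rows <;> by_cases h3 : 1 ≤ j <;> by_cases h4 : j + 1 < cols <;>
    simp only [h1, h2, h3, h4, and_true, and_false, if_pos, if_neg, not_false_iff] <;> ring

-- characterization of B's inner row-building fold
theorem rowfold_char (cols : Nat) (p1 p2 p3 : Nat → Int) (G : Nat → Int)
    (hG0 : G 0 = 0) (hGs : ∀ j < cols, G (j+1) = G j + p1 j - p2 j + p3 j) :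
    ∀ c ≤ cols,
      let nr := (List.range c).foldl (fun r j => r ++ [r.getLastD 0 + p1 j - p2 j + p3 j]) [0]
      nr.length = c + 1 ∧ ∀ j ≤ c, nr.getD j 0 = G j := by
  intro c
  induction c with
  | zero => intro _; simp [hG0]
  | succ c ih =>
    intro hc
    obtain ⟨hlen, hval⟩ := ih (by omega)
    simp only [List.range_succ, List.foldl_append, List.foldl_cons, List.foldl_nil]
    set nr := (List.range c).foldl (fun r j => r ++ [r.getLastD 0 + p1 j - p2 j + p3 j]) [0] with hnr
    have hlast : nr.getLastD 0 = G c := by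
      rw [List.getLastD_eq_getLast?, List.getLast?_eq_getElem?]
      have h1 : nr.length - 1 = c := by omega
      rw [h1]
      have := hval c (le_refl c)
      rwa [List.getD_eq_getElem?_getD] at this
    constructor
    · simp [hlen]
    · intro j hj
      by_cases hjc : j ≤ c
      · rw [List.getD_append _ _ _ _ (by omega)]
        exact hval j hjc
      · have hj1 : j = c + 1 := by omega
        subst hj1
        have he : (nr ++ [nr.getLastD 0 + p1 c - p2 c + p3 c]).getD (c+1) 0
            = nr.getLastD 0 + p1 c - p2 c + p3 c := by
          rw [List.getD_eq_getElem?_getD, List.getElem?_append_right (by omega), hlen]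
          simp
        rw [he, hlast, hGs c (by omega)]

theorem getLastD_eq_getD_len {α : Type} (P : List α) (d : α) (t : Nat) (h : P.length = t + 1) :
    P.getLastD d = P.getD t d := by
  rw [List.getLastD_eq_getLast?, List.getLast?_eq_getElem?, h, List.getD_eq_getElem?_getD]
  simp

theorem Fsum_succ_succ (f : Nat → Nat → Int) (t j : Nat) :
    Fsum f (t+1) (j+1) = Fsum f (t+1) j + Fsum f t (j+1) - Fsum f t j + f t j := by
  simp [Fsum, Finset.sum_range_succ]
  ring

-- characterization of B's prefix-sum table builder
theorem P_build (grid : List (List Int)) (cols : Nat) :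
    ∀ (l done P0 : List (List Int)),
    grid = done ++ l →
    P0.length = done.length + 1 →
    (∀ i ≤ done.length, ∀ j ≤ cols, (P0.getD i []).getD j 0 = Fsum (origf grid) i j) →
    (l.foldl (fun P row =>
        P ++ [(List.range cols).foldl (fun r j =>
            r ++ [r.getLastD 0 + (P.getLastD []).getD (j+1) 0 - (P.getLastD []).getD j 0 + row.getD j 0]) [0]]) P0).length = grid.length + 1 ∧
    ∀ i ≤ grid.length, ∀ j ≤ cols,
      ((l.foldl (fun P row =>
        P ++ [(List.range cols).foldl (fun r j =>
            r ++ [r.getLastD 0 + (P.getLastD []).getD (j+1) 0 - (P.getLastD []).getD j 0 + row.getD j 0]) [0]]) P0).getD i []).getD j 0 = Fsum (origf grid) i j := by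
  intro l
  induction l with
  | nil =>
    intro done P0 hg hlen hval
    simp only [List.foldl_nil]
    constructor
    · rw [hlen, hg]; simp
    · intro i hi j hj
      exact hval i (by rw [hg] at hi; simpa using hi) j hj
  | cons row l' ih =>
    intro done P0 hg hlen hval
    simp only [List.foldl_cons]
    set t := done.length with ht
    have hprev : ∀ k ≤ cols, (P0.getLastD []).getD k 0 = Fsum (origf grid) t k := by
      intro k hk
      rw [getLastD_eq_getD_len P0 [] t hlen]
      exact hval t (le_refl t) k hk
    have hrow : ∀ k, row.getD k 0 = origf grid t k := by
      intro k
      have : grid.getD t [] = row := by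
        rw [hg, List.getD_eq_getElem?_getD, List.getElem?_append_right (by omega)]
        simp [ht]
      rw [origf, this]
    have hGs : ∀ j < cols, Fsum (origf grid) (t+1) (j+1)
        = Fsum (origf grid) (t+1) j + (P0.getLastD []).getD (j+1) 0
          - (P0.getLastD []).getD j 0 + row.getD j 0 := by
      intro j hj
      rw [hprev (j+1) (by omega), hprev j (by omega), hrow j]
      exact Fsum_succ_succ (origf grid) t j
    have hnew := rowfold_char cols
        (fun j => (P0.getLastD []).getD (j+1) 0) (fun j => (P0.getLastD []).getD j 0)
        (fun j => row.getD j 0) (fun j => Fsum (origf grid) (t+1) j)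
        (by simp [Fsum]) hGs cols (le_refl cols)
    obtain ⟨hnlen, hnval⟩ := hnew
    apply ih (done ++ [row]) (P0 ++ _)
    · rw [hg]; simp
    · simp [hlen, ht]
    · intro i hi j hj
      simp only [List.length_append, List.length_cons, List.length_nil] at hi
      by_cases hit : i ≤ t
      · rw [List.getD_append _ _ _ _ (by omega)]
        exact hval i hit j hj
      · have hi1 : i = t + 1 := by omega
        subst hi1
        have hP : ∀ L : List Int, (P0 ++ [L]).getD (t+1) [] = L := by
          intro L
          rw [List.getD_eq_getElem?_getD, List.getElem?_append_right (by omega), hlen]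
          simp
        rw [hP]
        simpa using hnval j hj

theorem step_if (d : PySem.Dict (Int × Int) Int) (c : Int) (k : Int × Int) :
    (if d.contains k = true then c + d.getD k 0 else c) = c + (if d.contains k = true then d.getD k 0 else 0) := by
  split <;> simp

theorem dGrid_term (grid : List (List Int)) (rows cols : Nat) (x y : Int) :
    (if (dGridExpr grid rows cols).contains (x, y) = true then (dGridExpr grid rows cols).getD (x, y) 0 else 0)
    = (if 0 ≤ x ∧ x < rows ∧ 0 ≤ y ∧ y < cols then (grid.getD x.toNat []).getD y.toNat 0 else 0) := by
  rw [dGrid_contains]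
  by_cases h : 0 ≤ x ∧ x < (rows:Int) ∧ 0 ≤ y ∧ y < (cols:Int)
  · rw [if_pos (by simpa using h), if_pos h, dGrid_getD _ _ _ _ _ h]
  · rw [if_neg (by simpa using h), if_neg h]

-- ===== VERDICT (by name: the statement is the Claim_ definition above) =====
theorem spotlight_map_spec : Claim_equal_spotlight_map := by
  unfold Claim_equal_spotlight_map
  intro grid _ _
  unfold Spec_spotlight_map
  by_cases hgrid : grid = []
  · subst hgrid; rfl
  · simp only [spotlight_map, spotlight_map_alt, if_neg hgrid]
    rw [show ((List.range grid.length).foldl (fun d (i : Nat) =>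
      (List.range (grid.headD []).length).foldl (fun d (j : Nat) =>
        d.insert ((i : Int), (j : Int)) ((grid.getD i []).getD j 0)) d) PySem.Dict.empty)
      = dGridExpr grid grid.length (grid.headD []).length from by
        rw [nested_to_cells]; rfl]
    rw [dGrid_keys, List.foldl_map]
    rw [nested_to_cells]
    apply PySem.List.foldl_congr_mem
    intro acc p hp
    rw [mem_cells] at hp
    obtain ⟨hp1, hp2⟩ := hp
    simp only [cellKey, Int.toNat_natCast]
    congr 2
    simp only [List.foldl_cons, List.foldl_nil, step_if, dGrid_term]
    have hPB := (P_build grid ((grid.headD []).length) grid [] [List.replicate ((grid.headD []).length + 1) 0]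
      rfl (by simp) (by
        intro i hi j hj
        simp only [List.length_nil, Nat.le_zero] at hi
        subst hi
        simp [Fsum, List.getD_eq_getElem?_getD, List.getElem?_replicate]
        split <;> simp)).2
    rw [hPB (min (p.1 + 1) (grid.length - 1) + 1) (by omega) (min (p.2 + 1) ((grid.headD []).length - 1) + 1) (by omega),
        hPB (p.1 - 1) (by omega) (min (p.2 + 1) ((grid.headD []).length - 1) + 1) (by omega),
        hPB (min (p.1 + 1) (grid.length - 1) + 1) (by omega) (p.2 - 1) (by omega),
        hPB (p.1 - 1) (by omega) (p.2 - 1) (by omega)]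
    rw [rect_eq (origf grid) grid.length ((grid.headD []).length) p.1 p.2 hp1 hp2]
    have t1 : (if 0 ≤ (p.1:Int) + -1 ∧ (p.1:Int) + -1 < (grid.length:Int) ∧ 0 ≤ (p.2:Int) + -1 ∧ (p.2:Int) + -1 < (((grid.headD []).length:Nat):Int) then (grid.getD ((p.1:Int) + -1).toNat []).getD ((p.2:Int) + -1).toNat 0 else 0) = (if 1 ≤ p.1 ∧ 1 ≤ p.2 then origf grid (p.1-1) (p.2-1) else 0) := by
      by_cases h : 1 ≤ p.1 ∧ 1 ≤ p.2
      · rw [if_pos (by omega), if_pos h, show ((p.1:Int) + -1).toNat = p.1-1 by omega, show ((p.2:Int) + -1).toNat = p.2-1 by omega]; rfl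
      · rw [if_neg (by omega), if_neg h]
    have t2 : (if 0 ≤ (p.1:Int) + -1 ∧ (p.1:Int) + -1 < (grid.length:Int) ∧ 0 ≤ (p.2:Int) + 0 ∧ (p.2:Int) + 0 < (((grid.headD []).length:Nat):Int) then (grid.getD ((p.1:Int) + -1).toNat []).getD ((p.2:Int) + 0).toNat 0 else 0) = (if 1 ≤ p.1 then origf grid (p.1-1) (p.2) else 0) := by
      by_cases h : 1 ≤ p.1
      · rw [if_pos (by omega), if_pos h, show ((p.1:Int) + -1).toNat = p.1-1 by omega, show ((p.2:Int) + 0).toNat = p.2 by omega]; rfl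
      · rw [if_neg (by omega), if_neg h]
    have t3 : (if 0 ≤ (p.1:Int) + -1 ∧ (p.1:Int) + -1 < (grid.length:Int) ∧ 0 ≤ (p.2:Int) + 1 ∧ (p.2:Int) + 1 < (((grid.headD []).length:Nat):Int) then (grid.getD ((p.1:Int) + -1).toNat []).getD ((p.2:Int) + 1).toNat 0 else 0) = (if 1 ≤ p.1 ∧ p.2 + 1 < (grid.headD []).length then origf grid (p.1-1) (p.2+1) else 0) := by
      by_cases h : 1 ≤ p.1 ∧ p.2 + 1 < (grid.headD []).length
      · rw [if_pos (by omega), if_pos h, show ((p.1:Int) + -1).toNat = p.1-1 by omega, show ((p.2:Int) + 1).toNat = p.2+1 by omega]; rfl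
      · rw [if_neg (by omega), if_neg h]
    have t4 : (if 0 ≤ (p.1:Int) + 0 ∧ (p.1:Int) + 0 < (grid.length:Int) ∧ 0 ≤ (p.2:Int) + -1 ∧ (p.2:Int) + -1 < (((grid.headD []).length:Nat):Int) then (grid.getD ((p.1:Int) + 0).toNat []).getD ((p.2:Int) + -1).toNat 0 else 0) = (if 1 ≤ p.2 then origf grid (p.1) (p.2-1) else 0) := by
      by_cases h : 1 ≤ p.2
      · rw [if_pos (by omega), if_pos h, show ((p.1:Int) + 0).toNat = p.1 by omega, show ((p.2:Int) + -1).toNat = p.2-1 by omega]; rfl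
      · rw [if_neg (by omega), if_neg h]
    have t5 : (if 0 ≤ (p.1:Int) + 0 ∧ (p.1:Int) + 0 < (grid.length:Int) ∧ 0 ≤ (p.2:Int) + 0 ∧ (p.2:Int) + 0 < (((grid.headD []).length:Nat):Int) then (grid.getD ((p.1:Int) + 0).toNat []).getD ((p.2:Int) + 0).toNat 0 else 0) = origf grid p.1 p.2 := by
      rw [if_pos (by omega), show ((p.1:Int) + 0).toNat = p.1 by omega, show ((p.2:Int) + 0).toNat = p.2 by omega]; rfl
    have t6 : (if 0 ≤ (p.1:Int) + 0 ∧ (p.1:Int) + 0 < (grid.length:Int) ∧ 0 ≤ (p.2:Int) + 1 ∧ (p.2:Int) + 1 < (((grid.headD []).length:Nat):Int) then (grid.getD ((p.1:Int) + 0).toNat []).getD ((p.2:Int) + 1).toNat 0 else 0) = (if p.2 + 1 < (grid.headD []).length then origf grid (p.1) (p.2+1) else 0) := by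
      by_cases h : p.2 + 1 < (grid.headD []).length
      · rw [if_pos (by omega), if_pos h, show ((p.1:Int) + 0).toNat = p.1 by omega, show ((p.2:Int) + 1).toNat = p.2+1 by omega]; rfl
      · rw [if_neg (by omega), if_neg h]
    have t7 : (if 0 ≤ (p.1:Int) + 1 ∧ (p.1:Int) + 1 < (grid.length:Int) ∧ 0 ≤ (p.2:Int) + -1 ∧ (p.2:Int) + -1 < (((grid.headD []).length:Nat):Int) then (grid.getD ((p.1:Int) + 1).toNat []).getD ((p.2:Int) + -1).toNat 0 else 0) = (if p.1 + 1 < grid.length ∧ 1 ≤ p.2 then origf grid (p.1+1) (p.2-1) else 0) := by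
      by_cases h : p.1 + 1 < grid.length ∧ 1 ≤ p.2
      · rw [if_pos (by omega), if_pos h, show ((p.1:Int) + 1).toNat = p.1+1 by omega, show ((p.2:Int) + -1).toNat = p.2-1 by omega]; rfl
      · rw [if_neg (by omega), if_neg h]
    have t8 : (if 0 ≤ (p.1:Int) + 1 ∧ (p.1:Int) + 1 < (grid.length:Int) ∧ 0 ≤ (p.2:Int) + 0 ∧ (p.2:Int) + 0 < (((grid.headD []).length:Nat):Int) then (grid.getD ((p.1:Int) + 1).toNat []).getD ((p.2:Int) + 0).toNat 0 else 0) = (if p.1 + 1 < grid.length then origf grid (p.1+1) (p.2) else 0) := by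
      by_cases h : p.1 + 1 < grid.length
      · rw [if_pos (by omega), if_pos h, show ((p.1:Int) + 1).toNat = p.1+1 by omega, show ((p.2:Int) + 0).toNat = p.2 by omega]; rfl
      · rw [if_neg (by omega), if_neg h]
    have t9 : (if 0 ≤ (p.1:Int) + 1 ∧ (p.1:Int) + 1 < (grid.length:Int) ∧ 0 ≤ (p.2:Int) + 1 ∧ (p.2:Int) + 1 < (((grid.headD []).length:Nat):Int) then (grid.getD ((p.1:Int) + 1).toNat []).getD ((p.2:Int) + 1).toNat 0 else 0) = (if p.1 + 1 < grid.length ∧ p.2 + 1 < (grid.headD []).length then origf grid (p.1+1) (p.2+1) else 0) := by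
      by_cases h : p.1 + 1 < grid.length ∧ p.2 + 1 < (grid.headD []).length
      · rw [if_pos (by omega), if_pos h, show ((p.1:Int) + 1).toNat = p.1+1 by omega, show ((p.2:Int) + 1).toNat = p.2+1 by omega]; rfl
      · rw [if_neg (by omega), if_neg h]
    rw [t1, t2, t3, t4, t5, t6, t7, t8, t9, zero_add]
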